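-- pv_equiv track=rewrite | github.com/SaiHarsh24/Game-Theory-Project | Labelling_MaKTO.py | extract_round_groups
-- ===== SOURCE A (Python) =====
-- def extract_round_groups(thoughts: list) -> list[list[dict]]:
--     """
--     Split thoughts into round groups using the last_play=null signal
--     which marks the first play of each new round.
--     Returns a list of lists, each inner list is one round's entries.
--     """
--     rounds  = []
--     current = []
--
--     for entry in thoughts:
--         if entry.get("phase") != "action":
--             # Bidding entries belong to the current round
--             current.append(entry)
--             continue
--
--         last_play = entry.get("last_play")
--         if last_play is None and current:
--             # New round starting — save current and begin fresh
--             rounds.append(current)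
--             current = []
--
--         current.append(entry)
--
--     if current:
--         rounds.append(current)
--
--     return rounds
-- ===== SOURCE B (Python) =====
-- def extract_round_groups(thoughts: list) -> list[list[dict]]:
--     """Staged passes: first scan for round-boundary indices, then slice the
--     list into the consecutive segments between them (no running accumulator)."""
--     if not thoughts:
--         return []
--     n = len(thoughts)
--     boundaries = [i for i in range(1, n)
--                   if thoughts[i].get("phase") == "action"
--                   and thoughts[i].get("last_play") is None]
--     bounds = [0] + boundaries + [n]
--     return [thoughts[a:b] for a, b in zip(bounds, bounds[1:])]
-- ===== Notes on version B (the rewrite author's own statement) =====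
-- stated objective: alternative
-- what changed: B replaces A's single pass with a running 'current' buffer by two staged passes: it first collects the round-boundary indices (i>0, phase=='action', last_play None), then slices the input into the consecutive segments between 0, those boundaries, and len(thoughts); valid because A's 'and current' guard only matters before the very first entry.
import Mathlib
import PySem

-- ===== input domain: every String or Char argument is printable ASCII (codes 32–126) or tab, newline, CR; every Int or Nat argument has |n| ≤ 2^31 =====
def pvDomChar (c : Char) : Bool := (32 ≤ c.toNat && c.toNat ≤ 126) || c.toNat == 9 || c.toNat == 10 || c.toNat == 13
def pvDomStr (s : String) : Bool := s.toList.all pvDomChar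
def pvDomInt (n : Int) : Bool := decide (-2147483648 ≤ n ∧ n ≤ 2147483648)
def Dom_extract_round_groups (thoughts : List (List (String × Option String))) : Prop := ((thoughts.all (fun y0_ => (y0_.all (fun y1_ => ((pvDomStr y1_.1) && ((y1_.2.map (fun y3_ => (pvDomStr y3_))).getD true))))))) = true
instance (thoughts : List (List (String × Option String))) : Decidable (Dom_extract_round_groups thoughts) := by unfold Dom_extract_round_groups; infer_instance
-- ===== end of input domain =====

-- B replaces A's single pass with a 'current' buffer by two staged passes
-- (collect boundary indices, then slice between them); return values compared.

-- ===== PORT A =====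
-- one loop iteration of A: state is (rounds, current)
def pvStepA (s : List (List (List (String × Option String))) × List (List (String × Option String)))
    (entry : List (String × Option String)) :
    List (List (List (String × Option String))) × List (List (String × Option String)) :=
  if (PySem.Dict.mk entry).get? "phase" ≠ some (some "action") then
    (s.1, s.2 ++ [entry])
  else
    let last_play := (PySem.Dict.mk entry).get? "last_play"
    let lpIsNone : Bool := match last_play with
      | some (some _) => false
      | _ => true
    if lpIsNone && !s.2.isEmpty then
      (s.1 ++ [s.2], [entry])
    else
      (s.1, s.2 ++ [entry])

def extract_round_groups (thoughts : List (List (String × Option String))) :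
    List (List (List (String × Option String))) :=
  let s := thoughts.foldl pvStepA ([], [])
  if !s.2.isEmpty then s.1 ++ [s.2] else s.1

-- ===== PORT B =====
def pvIsBoundary (entry : List (String × Option String)) : Bool :=
  ((PySem.Dict.mk entry).get? "phase" == some (some "action")) &&
  (match (PySem.Dict.mk entry).get? "last_play" with
    | some (some _) => false
    | _ => true)

def extract_round_groups_alt (thoughts : List (List (String × Option String))) :
    List (List (List (String × Option String))) :=
  if thoughts.isEmpty then []
  else
    let n : Int := thoughts.length
    let boundaries : List Int := (PySem.List.pyRange 1 n 1).filter
      (fun i => match PySem.List.pyGet? thoughts i with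
        | some e => pvIsBoundary e
        | none => false)
    let bounds : List Int := 0 :: (boundaries ++ [n])
    (bounds.zip bounds.tail).map
      (fun ab => PySem.List.slice thoughts (some ab.1) (some ab.2))

-- ===== PRECONDITION & SPEC =====
def Spec_extract_round_groups (thoughts : List (List (String × Option String))) (out : List (List (List (String × Option String)))) : Prop := out = extract_round_groups_alt thoughts
instance (thoughts : List (List (String × Option String))) (out : List (List (List (String × Option String)))) : Decidable (Spec_extract_round_groups thoughts out) := by unfold Spec_extract_round_groups; infer_instance

-- ===== CLAIM (what is proved, stated in full; the proofs are below) =====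
def Claim_equal_extract_round_groups : Prop := ∀ (thoughts : List (List (String × Option String))), Dom_extract_round_groups thoughts → Spec_extract_round_groups thoughts (extract_round_groups thoughts)

-- ===== LEMMAS AND PROOFS =====

-- "not a boundary": the entries that stay in the current group
def pvNB (e : List (String × Option String)) : Bool := !pvIsBoundary e

-- common reference: split off the first group (head + following non-boundary
-- entries), recurse on the rest
def splitG : List (List (String × Option String)) → List (List (List (String × Option String)))
  | [] => []
  | e :: t => (e :: t.takeWhile pvNB) :: splitG (t.dropWhile pvNB)
  termination_by l => l.length
  decreasing_by
    simp only [List.length_cons]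
    exact Nat.lt_succ_of_le (List.length_dropWhile_le _ _)

-- whether position i of l is a boundary
def pvCutAt (l : List (List (String × Option String))) (i : Nat) : Bool :=
  match l[i]? with
  | some e => pvIsBoundary e
  | none => false

def pvTcuts (l : List (List (String × Option String))) : List Nat :=
  (List.range l.length).filter (pvCutAt l)

def pvSliceMap (l : List (List (String × Option String))) (bs : List Nat) :
    List (List (List (String × Option String))) :=
  (bs.zip bs.tail).map (fun ab => (l.drop ab.1).take (ab.2 - ab.1))

-- ---- A = splitG ----

theorem stepA_empty (R : List (List (List (String × Option String))))
    (e : List (String × Option String)) : pvStepA (R, []) e = (R, [e]) := by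
  by_cases hp : (PySem.Dict.mk e).get? "phase" = some (some "action") <;>
    simp [pvStepA, hp]

theorem stepA_boundary (s : List (List (List (String × Option String))) × List (List (String × Option String)))
    (e : List (String × Option String)) (h : pvIsBoundary e = true) (hC : s.2 ≠ []) :
    pvStepA s e = (s.1 ++ [s.2], [e]) := by
  simp only [pvIsBoundary, Bool.and_eq_true, beq_iff_eq] at h
  simp [pvStepA, h.1, h.2, hC]

theorem stepA_nonboundary (s : List (List (List (String × Option String))) × List (List (String × Option String)))
    (e : List (String × Option String)) (h : pvIsBoundary e = false) :
    pvStepA s e = (s.1, s.2 ++ [e]) := by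
  by_cases hp : (PySem.Dict.mk e).get? "phase" = some (some "action")
  · have h2 : (match (PySem.Dict.mk e).get? "last_play" with
      | some (some _) => false
      | _ => true) = false := by
      simpa [pvIsBoundary, hp] using h
    simp [pvStepA, hp, h2]
  · simp [pvStepA, hp]

theorem invA (l : List (List (String × Option String)))
    (R : List (List (List (String × Option String))))
    (C : List (List (String × Option String))) (hC : C ≠ []) :
    (let s := l.foldl pvStepA (R, C);
     if !s.2.isEmpty then s.1 ++ [s.2] else s.1)
      = R ++ (C ++ l.takeWhile pvNB) :: splitG (l.dropWhile pvNB) := by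
  induction l generalizing R C with
  | nil => simp [splitG, hC]
  | cons e l ih =>
    simp only [List.foldl_cons]
    by_cases hb : pvIsBoundary e = true
    · rw [show pvStepA (R, C) e = (R ++ [C], [e]) from stepA_boundary (R, C) e hb hC]
      rw [ih (R ++ [C]) [e] (by simp)]
      simp [pvNB, hb, splitG]
    · rw [show pvStepA (R, C) e = (R, C ++ [e]) from
        stepA_nonboundary (R, C) e (by simpa using hb)]
      rw [ih R (C ++ [e]) (by simp)]
      simp [pvNB, Bool.not_eq_true' .. |>.mpr (by simpa using hb)]

theorem A_eq_splitG (l : List (List (String × Option String))) :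
    extract_round_groups l = splitG l := by
  cases l with
  | nil => simp [extract_round_groups, splitG]
  | cons e t =>
    have h := invA t [] [e] (by simp)
    simpa [extract_round_groups, stepA_empty, splitG] using h

-- ---- B = splitG ----

theorem sliceMap_cons (l : List (List (String × Option String))) (a b : Nat) (rest : List Nat) :
    pvSliceMap l (a :: b :: rest)
      = (l.drop a).take (b - a) :: pvSliceMap l (b :: rest) := rfl

theorem sliceMap_shift (l : List (List (String × Option String))) (q : Nat) :
    ∀ bs : List Nat, pvSliceMap l (bs.map (fun k => q + k)) = pvSliceMap (l.drop q) bs := by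
  intro bs
  induction bs with
  | nil => rfl
  | cons a bs ih =>
    cases bs with
    | nil => rfl
    | cons b rest =>
      have e1 : pvSliceMap l (List.map (fun k => q + k) (a :: b :: rest))
          = (l.drop (q + a)).take ((q + b) - (q + a))
            :: pvSliceMap l (List.map (fun k => q + k) (b :: rest)) := rfl
      have e2 : pvSliceMap (l.drop q) (a :: b :: rest)
          = ((l.drop q).drop a).take (b - a) :: pvSliceMap (l.drop q) (b :: rest) := rfl
      rw [e1, e2, ih]
      congr 1
      rw [Nat.add_sub_add_left, List.drop_drop]

theorem sliceMap_cast (l : List (List (String × Option String))) :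
    ∀ bs : List Nat,
      ((bs.map (fun k : Nat => (k : Int))).zip (bs.map (fun k : Nat => (k : Int))).tail).map
          (fun ab => PySem.List.slice l (some ab.1) (some ab.2))
        = pvSliceMap l bs := by
  intro bs
  induction bs with
  | nil => rfl
  | cons a bs ih =>
    cases bs with
    | nil => rfl
    | cons b rest =>
      have e1 : ((List.map (fun k : Nat => (k : Int)) (a :: b :: rest)).zip
            ((List.map (fun k : Nat => (k : Int)) (a :: b :: rest)).tail)).map
            (fun ab => PySem.List.slice l (some ab.1) (some ab.2))
          = PySem.List.slice l (some (a : Int)) (some (b : Int))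
            :: ((List.map (fun k : Nat => (k : Int)) (b :: rest)).zip
              ((List.map (fun k : Nat => (k : Int)) (b :: rest)).tail)).map
              (fun ab => PySem.List.slice l (some ab.1) (some ab.2)) := rfl
      have e2 : pvSliceMap l (a :: b :: rest)
          = (l.drop a).take (b - a) :: pvSliceMap l (b :: rest) := rfl
      rw [e1, e2, ih]
      congr 1
      exact PySem.List.slice_natCast l a b

theorem tcuts_append (P S : List (List (String × Option String)))
    (hP : ∀ x ∈ P, pvIsBoundary x = false) :
    pvTcuts (P ++ S) = (pvTcuts S).map (fun i => P.length + i) := by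
  unfold pvTcuts
  rw [List.length_append, List.range_add, List.filter_append, List.filter_map]
  have h1 : (List.range P.length).filter (pvCutAt (P ++ S)) = [] := by
    rw [List.filter_eq_nil_iff]
    intro j hj
    rw [List.mem_range] at hj
    simp [pvCutAt, List.getElem?_append_left hj, List.getElem?_eq_getElem hj,
      hP _ (List.getElem_mem _)]
  rw [h1, List.nil_append]
  congr 1
  apply List.filter_congr
  intro i _
  simp [pvCutAt, Function.comp, List.getElem?_append_right (Nat.le_add_right ..)]

theorem tcuts_cons_boundary (c : List (String × Option String))
    (r : List (List (String × Option String))) (hc : pvIsBoundary c = true) :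
    pvTcuts (c :: r) = 0 :: (pvTcuts r).map (fun i => 1 + i) := by
  unfold pvTcuts
  rw [show (c :: r).length = 1 + r.length from by simp [Nat.add_comm],
    List.range_add, List.filter_append, List.filter_map]
  have h0 : (List.range 1).filter (pvCutAt (c :: r)) = [0] := by
    have : List.range 1 = [0] := rfl
    rw [this]
    simp [pvCutAt, hc]
  rw [h0]
  rw [List.cons_append, List.nil_append]
  have hf : List.filter (pvCutAt (c :: r) ∘ fun x => 1 + x) (List.range r.length)
      = List.filter (pvCutAt r) (List.range r.length) :=
    List.filter_congr (fun i _ => by simp [pvCutAt, Function.comp, Nat.add_comm 1 i])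
  rw [hf]

theorem sliceMap_main : ∀ (n : Nat) (t : List (List (String × Option String)))
    (e : List (String × Option String)), t.length = n →
    pvSliceMap (e :: t) (0 :: (pvTcuts t).map (fun k => 1 + k) ++ [t.length + 1])
      = splitG (e :: t) := by
  intro n
  induction n using Nat.strong_induction_on with
  | _ n ih =>
    intro t e hn
    have hPS : t.takeWhile pvNB ++ t.dropWhile pvNB = t := List.takeWhile_append_dropWhile
    have hP : ∀ x ∈ t.takeWhile pvNB, pvIsBoundary x = false := by
      intro x hx
      have := List.mem_takeWhile_imp hx
      simpa [pvNB] using this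
    have htc : pvTcuts t
        = (pvTcuts (t.dropWhile pvNB)).map (fun i => (t.takeWhile pvNB).length + i) := by
      conv_lhs => rw [← hPS]
      exact tcuts_append _ _ hP
    rw [splitG]
    cases hS : t.dropWhile pvNB with
    | nil =>
      have hPt : t.takeWhile pvNB = t := by
        conv_rhs => rw [← hPS]
        rw [hS, List.append_nil]
      have htc0 : pvTcuts t = [] := by rw [htc, hS]; rfl
      rw [htc0, hPt, splitG]
      show pvSliceMap (e :: t) [0, t.length + 1] = [e :: t]
      rw [sliceMap_cons]
      show [List.take (t.length + 1 - 0) (e :: t)] = [e :: t]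
      rw [Nat.sub_zero, List.take_succ_cons, List.take_length]
    | cons c r =>
      have hne : t.dropWhile pvNB ≠ [] := by rw [hS]; simp
      have hc : pvIsBoundary c = true := by
        have h := List.head_dropWhile_not pvNB hne
        rw [show (t.dropWhile pvNB).head hne = c from by simp [hS]] at h
        simpa [pvNB] using h
      have hlen : t.length = (t.takeWhile pvNB).length + (1 + r.length) := by
        conv_lhs => rw [← hPS]
        rw [hS]
        simp only [List.length_append, List.length_cons]
        omega
      set m := (t.takeWhile pvNB).length with hm
      have htc2 : pvTcuts t = m :: (pvTcuts r).map (fun i => m + (1 + i)) := by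
        rw [htc, hS, tcuts_cons_boundary c r hc]
        simp [List.map_map]
        intro a _
        omega
      rw [htc2]
      simp only [List.map_cons, List.map_map, List.cons_append]
      rw [sliceMap_cons]
      have hhead : List.take (1 + m - 0) (List.drop 0 (e :: t)) = e :: t.takeWhile pvNB := by
        rw [Nat.sub_zero, List.drop_zero, Nat.add_comm 1 m]
        show e :: List.take m t = e :: t.takeWhile pvNB
        conv_lhs => rw [← hPS]
        rw [List.take_left' hm.symm]
      have htail : (1 + m) :: ((pvTcuts r).map ((fun k => 1 + k) ∘ fun i => m + (1 + i)) ++ [t.length + 1])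
          = (0 :: (pvTcuts r).map (fun k => 1 + k) ++ [r.length + 1]).map (fun k => (1 + m) + k) := by
        simp only [List.cons_append, List.map_cons, List.map_append, List.map_map,
          List.map_nil, Nat.add_zero]
        congr 1
        congr 1
        · apply List.map_congr_left
          intro i _
          simp only [Function.comp]
          omega
        · simp only [List.cons.injEq, and_true]
          omega
      rw [hhead, htail, sliceMap_shift]
      have hdrop : List.drop (1 + m) (e :: t) = c :: r := by
        rw [Nat.add_comm 1 m]
        show List.drop m t = c :: r
        conv_lhs => rw [← hPS]
        rw [List.drop_left' hm.symm, hS]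
      rw [hdrop]
      congr 1
      have := ih r.length (by omega) r c rfl
      simpa using this

theorem B_bridge (e : List (String × Option String))
    (t : List (List (String × Option String))) :
    extract_round_groups_alt (e :: t)
      = pvSliceMap (e :: t) (0 :: (pvTcuts t).map (fun k => 1 + k) ++ [t.length + 1]) := by
  unfold extract_round_groups_alt
  rw [if_neg (by simp)]
  show ((((PySem.List.pyRange 1 ((e :: t).length : Int) 1).filter
        (fun i => match PySem.List.pyGet? (e :: t) i with
          | some e => pvIsBoundary e
          | none => false) ++ [((e :: t).length : Int)]).cons 0).zip
      ((((PySem.List.pyRange 1 ((e :: t).length : Int) 1).filter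
        (fun i => match PySem.List.pyGet? (e :: t) i with
          | some e => pvIsBoundary e
          | none => false) ++ [((e :: t).length : Int)]).cons 0).tail)).map
      (fun ab => PySem.List.slice (e :: t) (some ab.1) (some ab.2))
    = pvSliceMap (e :: t) (0 :: (pvTcuts t).map (fun k => 1 + k) ++ [t.length + 1])
  have hn : ((e :: t).length : Int) = ((t.length + 1 : Nat) : Int) := by simp
  have hrange : PySem.List.pyRange 1 ((e :: t).length : Int) 1
      = (List.range t.length).map (fun k : Nat => (1 : Int) + k) := by
    rw [PySem.List.pyRange_one]
    congr 1
    simp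
  have hbd : (PySem.List.pyRange 1 ((e :: t).length : Int) 1).filter
        (fun i => match PySem.List.pyGet? (e :: t) i with
          | some e => pvIsBoundary e
          | none => false)
      = ((pvTcuts t).map (fun k => 1 + k)).map (fun k : Nat => (k : Int)) := by
    rw [hrange, List.filter_map]
    have hpt : ∀ k : Nat,
        ((fun i => match PySem.List.pyGet? (e :: t) i with
          | some e => pvIsBoundary e
          | none => false) ∘ (fun k : Nat => (1 : Int) + k)) k = pvCutAt t k := by
      intro k
      have h1 : ((1 : Int) + k) = ((k + 1 : Nat) : Int) := by push_cast; ring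
      simp only [Function.comp, h1, PySem.List.pyGet?_natCast, List.getElem?_cons_succ]
      rfl
    rw [List.filter_congr (fun k _ => hpt k)]
    show ((List.range t.length).filter (pvCutAt t)).map _ = _
    rw [List.map_map]
    apply List.map_congr_left
    intro k _
    simp only [Function.comp]
    push_cast
    ring
  rw [hbd]
  have hbounds : (0 : Int) :: (((pvTcuts t).map (fun k => 1 + k)).map (fun k : Nat => (k : Int))
        ++ [((e :: t).length : Int)])
      = ((0 :: (pvTcuts t).map (fun k => 1 + k) ++ [t.length + 1]).map (fun k : Nat => (k : Int))) := by
    simp only [List.map_cons, List.map_append, List.map_nil, List.cons_append,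
      Nat.cast_zero, hn]
  rw [hbounds, sliceMap_cast]

theorem B_eq_splitG (l : List (List (String × Option String))) :
    extract_round_groups_alt l = splitG l := by
  cases l with
  | nil => simp [extract_round_groups_alt, splitG]
  | cons e t => rw [B_bridge, sliceMap_main t.length t e rfl, splitG]

-- ===== VERDICT (by name: the statement is the Claim_ definition above) =====
theorem extract_round_groups_spec : Claim_equal_extract_round_groups := by
  intro thoughts _
  show extract_round_groups thoughts = extract_round_groups_alt thoughts
  rw [A_eq_splitG, B_eq_splitG]
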